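-- pv_equiv track=rewrite | github.com/phamminhducxt/ttattt | tt co ban/8.py | tim_so_T_prime
-- ===== SOURCE A (Python) =====
-- def tim_so_T_prime(N):
--     T_primes = []
--     for num in range(4, N + 1):  # Duyệt qua các số từ 4 đến N
--         uoc_count = 0
--         for i in range(1, num + 1):  # Duyệt qua các số từ 1 đến num
--             if num % i == 0:
--                 uoc_count += 1
--                 if uoc_count > 3:  # Nếu số lượng ước lớn hơn 3, không phải là số T-prime
--                     break
--         if uoc_count == 3:  # Nếu số lượng ước là 3, là số T-prime
--             T_primes.append(num)
--     return T_primes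
-- ===== SOURCE B (Python) =====
-- def tim_so_T_prime(N):
--     # T-primes are exactly the squares of primes: enumerate k with k*k <= N,
--     # test k for primality by trial division, and emit k*k in increasing order.
--     T_primes = []
--     k = 2
--     while k * k <= N:
--         if all(k % d != 0 for d in range(2, k)):
--             T_primes.append(k * k)
--         k += 1
--     return T_primes
-- ===== Notes on version B (the rewrite author's own statement) =====
-- stated objective: faster
-- what changed: Instead of counting divisors of every number from 4 to N (scanning up to num candidate divisors each), B enumerates only k with k*k <= N, tests k for primality by trial division, and outputs the prime squares directly in increasing order.
import Mathlib
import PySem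

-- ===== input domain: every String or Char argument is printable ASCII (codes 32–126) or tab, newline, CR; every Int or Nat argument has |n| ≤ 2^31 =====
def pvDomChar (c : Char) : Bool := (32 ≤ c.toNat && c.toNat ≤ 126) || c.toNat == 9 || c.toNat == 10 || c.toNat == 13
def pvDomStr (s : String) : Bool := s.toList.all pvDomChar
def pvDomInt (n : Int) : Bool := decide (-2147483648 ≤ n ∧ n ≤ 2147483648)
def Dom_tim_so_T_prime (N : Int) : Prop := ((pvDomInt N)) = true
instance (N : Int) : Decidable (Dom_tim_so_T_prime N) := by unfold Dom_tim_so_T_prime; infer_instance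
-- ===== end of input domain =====

-- B replaces A's per-number divisor-count scan over [4, N] by enumerating k with k*k <= N,
-- trial-dividing k for primality, and emitting the prime squares k*k directly (objective: faster).


-- ===== PORT A =====
-- A's inner loop: 'for i in is: if num % i == 0: uoc_count += 1; if uoc_count > 3: break'
def pvCountLoop (num : Int) (is : List Int) (cnt : Int) : Int :=
  match is with
  | [] => cnt
  | i :: rest =>
    if PySem.Int.mod num i = 0 then
      if cnt + 1 > 3 then cnt + 1 else pvCountLoop num rest (cnt + 1)
    else pvCountLoop num rest cnt

def tim_so_T_prime (N : Int) : List Int :=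
  (PySem.List.pyRange 4 (N + 1) 1).foldl
    (fun T_primes num =>
      if pvCountLoop num (PySem.List.pyRange 1 (num + 1) 1) 0 = 3
      then T_primes ++ [num] else T_primes) []

-- ===== PORT B =====
-- B's 'all(k % d != 0 for d in range(2, k))'
def pvIsPrimeTrial (k : Int) : Bool :=
  (PySem.List.pyRange 2 k 1).all (fun d => PySem.Int.mod k d != 0)

-- B's 'while k * k <= N: …; k += 1' (fuel only makes the loop total; it never runs out, see pvAltLoop_eq)
def pvAltLoop (N : Int) : Nat → Int → List Int → List Int
  | 0, _, T_primes => T_primes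
  | fuel + 1, k, T_primes =>
    if k * k ≤ N then
      pvAltLoop N fuel (k + 1) (if pvIsPrimeTrial k then T_primes ++ [k * k] else T_primes)
    else T_primes

def tim_so_T_prime_alt (N : Int) : List Int := pvAltLoop N (N - 1).toNat 2 []

-- ===== PRECONDITION & SPEC =====
def Spec_tim_so_T_prime (N : Int) (out : List Int) : Prop := out = tim_so_T_prime_alt N
instance (N : Int) (out : List Int) : Decidable (Spec_tim_so_T_prime N out) := by unfold Spec_tim_so_T_prime; infer_instance

-- ===== CLAIM (what is proved, stated in full; the proofs are below) =====
def Claim_equal_tim_so_T_prime : Prop := ∀ (N : Int), Dom_tim_so_T_prime N → Spec_tim_so_T_prime N (tim_so_T_prime N)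

-- ===== LEMMAS AND PROOFS =====

-- A's inner loop computes the divisor count of num over the candidate list, capped at 4.
theorem pvCountLoop_eq (num : Int) (is : List Int) (cnt : Int) (h : cnt ≤ 3) :
    pvCountLoop num is cnt
      = min (cnt + (is.countP (fun i => PySem.Int.mod num i == 0) : Int)) 4 := by
  induction is generalizing cnt with
  | nil => simp [pvCountLoop]; omega
  | cons i rest ih =>
    simp only [pvCountLoop, List.countP_cons]
    by_cases hd : PySem.Int.mod num i = 0
    · simp only [hd, beq_self_eq_true, if_true]
      by_cases hc : cnt + 1 > 3
      · rw [if_pos hc]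
        push_cast
        omega
      · rw [if_neg hc, ih (cnt + 1) (by omega)]
        push_cast; omega
    · rw [if_neg hd]
      rw [ih cnt h]
      have : ((PySem.Int.mod num i == 0) : Bool) = false := by simp [hd]
      simp [this]

-- list-level divisor counting equals the cardinality of Nat.divisors
theorem countP_range_divisors (n : ℕ) (hn : 0 < n) :
    (List.range n).countP (fun j => decide ((j + 1) ∣ n)) = n.divisors.card := by
  have h1 : (List.range n).countP (fun j => decide ((j + 1) ∣ n))
      = ((Finset.range n).filter (fun j => (j + 1) ∣ n)).card := by
    rw [List.countP_eq_length_filter]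
    rfl
  rw [h1]
  apply Finset.card_bij (i := fun j _ => j + 1)
  · intro j hj
    simp only [Finset.mem_filter, Finset.mem_range] at hj
    exact Nat.mem_divisors.mpr ⟨hj.2, hn.ne'⟩
  · intro a ha b hb hab; omega
  · intro d hd
    rw [Nat.mem_divisors] at hd
    have hd1 : 1 ≤ d := Nat.one_le_iff_ne_zero.mpr (by rintro rfl; exact hd.2 (Nat.eq_zero_of_zero_dvd hd.1))
    have hdn : d ≤ n := Nat.le_of_dvd hn hd.1
    refine ⟨d - 1, ?_, by omega⟩
    simp only [Finset.mem_filter, Finset.mem_range]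
    constructor
    · omega
    · have : d - 1 + 1 = d := by omega
      rw [this]; exact hd.1

-- a number ≥ 2 has exactly 3 divisors iff it is the square of a prime
theorem card_divisors_three_iff (n : ℕ) (hn : 2 ≤ n) :
    n.divisors.card = 3 ↔ ∃ p, p.Prime ∧ n = p * p := by
  constructor
  · intro h3
    have hn0 : n ≠ 0 := by omega
    have hnprime : ¬ n.Prime := by
      intro hp
      rw [hp.divisors] at h3
      have h2 := Finset.card_insert_le 1 ({n} : Finset ℕ)
      rw [h3] at h2
      simp at h2
    have pp : n.minFac.Prime := Nat.minFac_prime (by omega)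
    set p := n.minFac with hpdef
    have pd : p ∣ n := Nat.minFac_dvd n
    set q := n / p with hqdef
    have hpq : p * q = n := Nat.mul_div_cancel' pd
    have hqd : q ∣ n := Nat.div_dvd_of_dvd pd
    have hp1 : p ≠ 1 := pp.one_lt.ne'
    have hpn : p ≠ n := fun h => hnprime (h ▸ pp)
    have hq1 : q ≠ 1 := by
      intro h
      rw [h, Nat.mul_one] at hpq
      exact hpn hpq
    have hqn : q ≠ n := by
      intro h
      have hp2 : 2 ≤ p := pp.two_le
      nlinarith [hpq, h, hn]
    have hqp : q = p := by
      by_contra hne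
      have hsub : ({1, p, q, n} : Finset ℕ) ⊆ n.divisors := by
        intro x hx
        simp only [Finset.mem_insert, Finset.mem_singleton] at hx
        rcases hx with rfl | rfl | rfl | rfl
        · exact Nat.mem_divisors.mpr ⟨one_dvd n, hn0⟩
        · exact Nat.mem_divisors.mpr ⟨pd, hn0⟩
        · exact Nat.mem_divisors.mpr ⟨hqd, hn0⟩
        · exact Nat.mem_divisors.mpr ⟨dvd_refl _, hn0⟩
      have m1 : (1 : ℕ) ∉ ({p, q, n} : Finset ℕ) := by
        simp only [Finset.mem_insert, Finset.mem_singleton]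
        push_neg
        omega
      have m2 : p ∉ ({q, n} : Finset ℕ) := by
        simp only [Finset.mem_insert, Finset.mem_singleton]
        push_neg
        omega
      have m3 : q ∉ ({n} : Finset ℕ) := by simp [hqn]
      have hcard : ({1, p, q, n} : Finset ℕ).card = 4 := by
        rw [Finset.card_insert_of_notMem m1, Finset.card_insert_of_notMem m2,
            Finset.card_insert_of_notMem m3, Finset.card_singleton]
      have := Finset.card_le_card hsub
      omega
    exact ⟨p, pp, by rw [← hpq, hqp]⟩
  · rintro ⟨p, pp, rfl⟩
    rw [show p * p = p ^ 2 by ring, Nat.divisors_prime_pow pp]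
    simp

-- the divisor count A accumulates over range(1, num+1) is |divisors of num|
theorem countP_pyRange_divisors (num : Int) (h4 : 4 ≤ num) :
    ((PySem.List.pyRange 1 (num + 1) 1).countP (fun i => PySem.Int.mod num i == 0))
      = num.toNat.divisors.card := by
  rw [PySem.List.pyRange_one]
  rw [List.countP_map]
  have hnum : (num.toNat : Int) = num := Int.toNat_of_nonneg (by omega)
  have hlen : (num + 1 - 1).toNat = num.toNat := by omega
  rw [hlen]
  rw [← countP_range_divisors num.toNat (by omega)]
  apply List.countP_congr
  intro j hj
  simp only [Function.comp_apply]
  have : (1 + (j : Int)) = ((j + 1 : ℕ) : Int) := by push_cast; ring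
  rw [this]
  have h2 := @Int.natCast_dvd_natCast (j + 1) num.toNat
  rw [hnum] at h2
  simp only [beq_iff_eq, decide_eq_true_eq]
  rw [PySem.Int.mod_eq_zero_iff_dvd, h2]

-- A is the list of num in [4, N] with exactly 3 divisors
theorem timA_eq_filter (N : Int) :
    tim_so_T_prime N
      = (PySem.List.pyRange 4 (N + 1) 1).filter
          (fun num => decide (pvCountLoop num (PySem.List.pyRange 1 (num + 1) 1) 0 = 3)) := by
  unfold tim_so_T_prime
  rw [PySem.List.foldl_append_ite_eq_filter]
  simp

theorem memA_iff (N x : Int) :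
    x ∈ tim_so_T_prime N ↔ 4 ≤ x ∧ x < N + 1 ∧ x.toNat.divisors.card = 3 := by
  rw [timA_eq_filter, List.mem_filter, PySem.List.mem_pyRange_one]
  constructor
  · rintro ⟨⟨h4, hN⟩, hc⟩
    refine ⟨h4, hN, ?_⟩
    rw [decide_eq_true_eq, pvCountLoop_eq x _ 0 (by omega),
        countP_pyRange_divisors x h4] at hc
    omega
  · rintro ⟨h4, hN, hcard⟩
    refine ⟨⟨h4, hN⟩, ?_⟩
    rw [decide_eq_true_eq, pvCountLoop_eq x _ 0 (by omega),
        countP_pyRange_divisors x h4, hcard]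
    norm_num

-- integer square root used only by the proofs to describe B's loop bound
def pvSqrt (N : Int) : Int := (Nat.sqrt N.toNat : Int)

theorem sq_le_iff_le_sqrt (N k : Int) (hk : 2 ≤ k) : k * k ≤ N ↔ k ≤ pvSqrt N := by
  unfold pvSqrt
  constructor
  · intro h
    have hN : 0 ≤ N := by nlinarith
    have hk0 : (k.toNat : Int) = k := Int.toNat_of_nonneg (by omega)
    have hN0 : (N.toNat : Int) = N := Int.toNat_of_nonneg hN
    have hkk : k.toNat * k.toNat ≤ N.toNat := by
      have h' : (k.toNat : Int) * k.toNat ≤ (N.toNat : Int) := by rw [hk0, hN0]; exact h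
      exact_mod_cast h'
    have := Nat.le_sqrt.mpr hkk
    omega
  · intro h
    have hk' : k.toNat ≤ Nat.sqrt N.toNat := by omega
    have := Nat.le_sqrt.mp hk'
    by_cases hN : 0 ≤ N
    · have h1 : (k.toNat : Int) = k := Int.toNat_of_nonneg (by omega)
      have h2 : (N.toNat : Int) = N := Int.toNat_of_nonneg hN
      have : (k.toNat * k.toNat : Int) ≤ (N.toNat : Int) := by exact_mod_cast this
      push_cast at this
      rw [h1] at this
      omega
    · exfalso
      have : N.toNat = 0 := by omega
      rw [this] at hk'
      simp [Nat.sqrt] at hk'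
      omega

-- B's while loop appends the squares of the trial-division primes in [k, sqrt N]
theorem pvAltLoop_eq (N : Int) :
    ∀ (fuel : ℕ) (k : Int) (acc : List Int), 2 ≤ k → (N + 1 - k).toNat ≤ fuel →
      pvAltLoop N fuel k acc
        = acc ++ ((PySem.List.pyRange k (pvSqrt N + 1) 1).filter
            (fun j => pvIsPrimeTrial j)).map (fun j => j * j) := by
  intro fuel
  induction fuel with
  | zero =>
    intro k acc hk hm
    have hks : pvSqrt N + 1 ≤ k := by
      unfold pvSqrt
      have := Nat.sqrt_le_self N.toNat
      omega
    rw [pvAltLoop, PySem.List.pyRange_one_eq_nil hks]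
    simp
  | succ fuel ih =>
    intro k acc hk hm
    rw [pvAltLoop]
    by_cases hg : k * k ≤ N
    · rw [if_pos hg]
      have hks : k ≤ pvSqrt N := (sq_le_iff_le_sqrt N k hk).mp hg
      have hkN : k ≤ N := by nlinarith
      rw [ih (k + 1) (if pvIsPrimeTrial k then acc ++ [k * k] else acc) (by omega) (by omega)]
      rw [PySem.List.pyRange_one_cons (show k < pvSqrt N + 1 by omega)]
      by_cases hp : pvIsPrimeTrial k
      · rw [if_pos hp, List.filter_cons_of_pos (by simp [hp])]
        simp
      · rw [if_neg hp, List.filter_cons_of_neg (by simp [hp])]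
    · rw [if_neg hg]
      have hks : ¬ k ≤ pvSqrt N := fun h => hg ((sq_le_iff_le_sqrt N k hk).mpr h)
      rw [PySem.List.pyRange_one_eq_nil (by omega)]
      simp

theorem timB_eq (N : Int) :
    tim_so_T_prime_alt N
      = ((PySem.List.pyRange 2 (pvSqrt N + 1) 1).filter
          (fun j => pvIsPrimeTrial j)).map (fun j => j * j) := by
  unfold tim_so_T_prime_alt
  rw [pvAltLoop_eq N (N - 1).toNat 2 [] (by omega) (by omega)]
  simp

-- trial division over range(2, k) is primality of k
theorem pvIsPrimeTrial_iff (k : Int) (hk : 2 ≤ k) :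
    pvIsPrimeTrial k = true ↔ k.toNat.Prime := by
  unfold pvIsPrimeTrial
  rw [List.all_eq_true]
  have hkk : (k.toNat : Int) = k := Int.toNat_of_nonneg (by omega)
  constructor
  · intro h
    rw [Nat.prime_def_lt]
    refine ⟨by omega, ?_⟩
    intro m hm hmd
    rcases Nat.eq_zero_or_pos m with rfl | hm1
    · exfalso
      have := Nat.eq_zero_of_zero_dvd hmd
      omega
    by_contra hne
    have hm2 : 2 ≤ m := by omega
    have hmem : (m : Int) ∈ PySem.List.pyRange 2 k 1 := by
      rw [PySem.List.mem_pyRange_one]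
      omega
    have hdvd : (m : Int) ∣ k := by
      rw [← hkk]
      exact_mod_cast hmd
    have := h _ hmem
    rw [bne_iff_ne, ne_eq, PySem.Int.mod_eq_zero_iff_dvd] at this
    exact this hdvd
  · intro hp d hd
    rw [PySem.List.mem_pyRange_one] at hd
    rw [bne_iff_ne, ne_eq, PySem.Int.mod_eq_zero_iff_dvd]
    intro hdvd
    have hd0 : (d.toNat : Int) = d := Int.toNat_of_nonneg (by omega)
    have hdn : d.toNat ∣ k.toNat := by
      rw [← Int.natCast_dvd_natCast, hd0, hkk]
      exact hdvd
    have hlt : d.toNat < k.toNat := by omega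
    have := (Nat.prime_def_lt.mp hp).2 d.toNat hlt hdn
    omega

theorem main_eq (N : Int) : tim_so_T_prime N = tim_so_T_prime_alt N := by
  rw [timB_eq]
  have hpB : ∀ x ∈ (PySem.List.pyRange 2 (pvSqrt N + 1) 1).filter (fun j => pvIsPrimeTrial j),
      (2:Int) ≤ x := by
    intro x hx
    rw [List.mem_filter, PySem.List.mem_pyRange_one] at hx
    omega
  have hsB : ((PySem.List.pyRange 2 (pvSqrt N + 1) 1).filter (fun j => pvIsPrimeTrial j)).Pairwise (· < ·) :=
    (PySem.List.pairwise_lt_pyRange_one 2 (pvSqrt N + 1)).filter _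
  have hndA : (tim_so_T_prime N).Nodup := by
    rw [timA_eq_filter]
    exact List.Pairwise.imp (fun h => ne_of_lt h)
      ((PySem.List.pairwise_lt_pyRange_one 4 (N + 1)).filter _)
  have hndB : (((PySem.List.pyRange 2 (pvSqrt N + 1) 1).filter
      (fun j => pvIsPrimeTrial j)).map (fun j => j * j)).Nodup := by
    apply List.Nodup.map_on
    · intro a ha b hb hab
      have := hpB a ha
      have := hpB b hb
      nlinarith
    · exact List.Pairwise.imp (fun h => ne_of_lt h) hsB
  have hmem : ∀ x : Int, x ∈ tim_so_T_prime N ↔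
      x ∈ ((PySem.List.pyRange 2 (pvSqrt N + 1) 1).filter
        (fun j => pvIsPrimeTrial j)).map (fun j => j * j) := by
    intro x
    rw [memA_iff]
    rw [List.mem_map]
    constructor
    · rintro ⟨h4, hN, hcard⟩
      obtain ⟨p, pp, hx⟩ := (card_divisors_three_iff x.toNat (by omega)).mp hcard
      refine ⟨(p : Int), ?_, ?_⟩
      · rw [List.mem_filter, PySem.List.mem_pyRange_one]
        have hp2 : 2 ≤ (p : Int) := by exact_mod_cast pp.two_le
        have hxval : x = (p : Int) * (p : Int) := by
          have : (x.toNat : Int) = x := Int.toNat_of_nonneg (by omega)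
          rw [← this, hx]; push_cast; ring
        have hle : (p : Int) * (p : Int) ≤ N := by omega
        have := (sq_le_iff_le_sqrt N (p : Int) hp2).mp (by omega)
        refine ⟨⟨hp2, by omega⟩, ?_⟩
        rw [pvIsPrimeTrial_iff _ hp2]
        simpa using pp
      · have : (x.toNat : Int) = x := Int.toNat_of_nonneg (by omega)
        rw [← this, hx]; push_cast; ring
    · rintro ⟨j, hj, rfl⟩
      rw [List.mem_filter, PySem.List.mem_pyRange_one] at hj
      obtain ⟨⟨hj2, hjs⟩, hjp⟩ := hj
      have hjj : j * j ≤ N := (sq_le_iff_le_sqrt N j hj2).mpr (by omega)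
      have h4 : 4 ≤ j * j := by nlinarith
      refine ⟨h4, by omega, ?_⟩
      rw [card_divisors_three_iff _ (by omega)]
      refine ⟨j.toNat, (pvIsPrimeTrial_iff j hj2).mp hjp, ?_⟩
      have hjc : (j.toNat : Int) = j := Int.toNat_of_nonneg (by omega)
      have : ((j * j).toNat : Int) = (j.toNat * j.toNat : ℕ) := by push_cast; rw [hjc]; omega
      exact_mod_cast this
  refine List.Perm.eq_of_pairwise (le := fun (a b : Int) => a < b)
    (fun a b _ _ h1 h2 => absurd h1 (lt_asymm h2)) ?_ ?_
    ((List.perm_ext_iff_of_nodup hndA hndB).mpr hmem)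
  · rw [timA_eq_filter]
    exact (PySem.List.pairwise_lt_pyRange_one 4 (N + 1)).filter _
  · rw [List.pairwise_map]
    refine List.Pairwise.imp_of_mem ?_ hsB
    intro a b ha hb hab
    have := hpB a ha
    have := hpB b hb
    nlinarith

-- ===== VERDICT (by name: the statement is the Claim_ definition above) =====
theorem tim_so_T_prime_spec : Claim_equal_tim_so_T_prime := by
  intro N _
  unfold Spec_tim_so_T_prime
  exact main_eq N
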